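-- pv_equiv track=rewrite | github.com/koii-network/prometheus-beta | src/fibonacci_divisible.py | generate_modified_fibonacci
-- ===== SOURCE A (Python) =====
-- def generate_modified_fibonacci(n):
--     """
--     Generate a modified Fibonacci sequence up to n where the sum of any two
--     consecutive numbers (starting from the third number) is divisible by 3.
--
--     Args:
--         n (int): The maximum number of elements to generate in the sequence
--
--     Returns:
--         list: A modified Fibonacci sequence
--
--     Raises:
--         ValueError: If input is not a positive integer
--     """
--     # Validate input
--     if not isinstance(n, int) or n <= 0:
--         raise ValueError("Input must be a positive integer")
--
--     # Special case handling for small sequences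
--     if n == 1:
--         return [1]
--     if n == 2:
--         return [1, 1]
--
--     # Initialize the sequence
--     sequence = [1, 1]
--
--     while len(sequence) < n:
--         # Calculate next number to ensure sum of last two is divisible by 3
--         next_num = 3 - (sequence[-1] + sequence[-2]) % 3
--         sequence.append(next_num)
--
--     return sequence[:n]
-- ===== SOURCE B (Python) =====
-- def generate_modified_fibonacci(n):
--     # Closed form: 1+1=2, next = 3-2%3 = 1, so the sequence is all ones.
--     if not isinstance(n, int) or n <= 0:
--         raise ValueError("Input must be a positive integer")
--     return [1] * n
-- ===== Notes on version B (the rewrite author's own statement) =====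
-- stated objective: simpler
-- what changed: The iterative modular recurrence (a while loop appending the next term and a final slice) is replaced by a direct closed-form construction of a constant-one list, since the recurrence is constantly one.
import Mathlib
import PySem

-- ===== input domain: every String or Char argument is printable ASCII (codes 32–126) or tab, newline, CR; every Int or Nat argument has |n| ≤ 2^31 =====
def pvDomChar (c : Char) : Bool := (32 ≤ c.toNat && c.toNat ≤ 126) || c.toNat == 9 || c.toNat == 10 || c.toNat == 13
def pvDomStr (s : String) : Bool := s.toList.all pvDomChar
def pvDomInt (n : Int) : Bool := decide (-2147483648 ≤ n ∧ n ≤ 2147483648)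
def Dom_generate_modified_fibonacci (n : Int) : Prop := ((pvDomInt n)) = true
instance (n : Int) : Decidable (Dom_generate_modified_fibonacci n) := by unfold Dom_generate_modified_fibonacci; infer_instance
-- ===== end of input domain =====

-- B replaces A's iterative modular recurrence with the closed form [1] * n (objective: simpler).

-- ===== PORT A =====
-- the while loop: each iteration appends 3 - (sequence[-1] + sequence[-2]) % 3;
-- it runs until len(sequence) = n, i.e. exactly fuel = (n - 2).toNat times from [1, 1].
def fibLoopA : Nat → List Int → List Int
  | 0, s => s
  | k + 1, s =>
      fibLoopA k (s ++ [3 - PySem.Int.mod (PySem.List.pyGetD s (-1) 0 + PySem.List.pyGetD s (-2) 0) 3])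

def generate_modified_fibonacci (n : Int) : List Int :=
  if n = 1 then [1]
  else if n = 2 then [1, 1]
  else PySem.List.slice (fibLoopA (n - 2).toNat [1, 1]) none (some n)

-- ===== PORT B =====
def generate_modified_fibonacci_alt (n : Int) : List Int :=
  List.replicate n.toNat 1

-- ===== PRECONDITION & SPEC =====
-- A raises ValueError exactly when n ≤ 0 (and so does B).
def Pre_generate_modified_fibonacci (n : Int) : Prop := 0 < n
instance (n : Int) : Decidable (Pre_generate_modified_fibonacci n) := by
  unfold Pre_generate_modified_fibonacci; infer_instance

def pvWitness_generate_modified_fibonacci : Int := 5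

def Spec_generate_modified_fibonacci (n : Int) (out : List Int) : Prop :=
  out = generate_modified_fibonacci_alt n
instance (n : Int) (out : List Int) : Decidable (Spec_generate_modified_fibonacci n out) := by
  unfold Spec_generate_modified_fibonacci; infer_instance

-- ===== CLAIM (what is proved, stated in full; the proofs are below) =====
def Claim_equal_generate_modified_fibonacci : Prop :=
  ∀ (n : Int), Dom_generate_modified_fibonacci n → Pre_generate_modified_fibonacci n →
    Spec_generate_modified_fibonacci n (generate_modified_fibonacci n)

-- ===== LEMMAS AND PROOFS =====
-- The loop started on at least two ones keeps producing ones.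
theorem fibLoopA_replicate (k : Nat) :
    ∀ m : Nat, 2 ≤ m → fibLoopA k (List.replicate m 1) = List.replicate (m + k) 1 := by
  induction k with
  | zero => intro m _; simp [fibLoopA]
  | succ k ih =>
      intro m hm
      have hne : List.replicate m (1 : Int) ≠ [] := by
        simp; omega
      have h1 : PySem.List.pyGetD (List.replicate m (1 : Int)) (-1) 0 = 1 := by
        rw [PySem.List.pyGetD_neg_one _ _ hne]
        exact List.getLast_replicate _
      have h2 : PySem.List.pyGetD (List.replicate m (1 : Int)) (-2) 0 = 1 := by
        rw [PySem.List.pyGetD_neg_ofNat _ 2 _ (by omega) (by simpa using hm)]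
        simp
      have hrep : List.replicate m (1 : Int) ++ [3 - PySem.Int.mod (1 + 1) 3]
          = List.replicate (m + 1) 1 := by
        have : (3 - PySem.Int.mod (1 + 1) 3 : Int) = 1 := by decide
        rw [this]
        simp [List.replicate_succ' (n := m)]
      show fibLoopA k _ = _
      rw [h1, h2, hrep, ih (m + 1) (by omega)]
      congr 1
      omega

theorem generate_modified_fibonacci_spec : Claim_equal_generate_modified_fibonacci := by
  intro n _ hn
  unfold Spec_generate_modified_fibonacci generate_modified_fibonacci generate_modified_fibonacci_alt
  have hn' : 0 < n := hn
  by_cases h1 : n = 1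
  · subst h1; decide
  · by_cases h2 : n = 2
    · subst h2; decide
    · rw [if_neg h1, if_neg h2]
      have h3 : 3 ≤ n := by omega
      have : fibLoopA (n - 2).toNat [1, 1] = List.replicate (2 + (n - 2).toNat) 1 := by
        have := fibLoopA_replicate (n - 2).toNat 2 (le_refl 2)
        simpa using this
      rw [this, PySem.List.slice_to _ (by omega)]
      have hlen : 2 + (n - 2).toNat = n.toNat := by omega
      rw [hlen]
      exact List.take_of_length_le (by simp)
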